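-- pv_equiv track=rewrite | github.com/HelloSSIFI/HelloWorld | programmers/Lv3_스타_수열/s1_lbefull.py | solution
-- ===== SOURCE A (Python) =====
-- def solution(a):
--     answer = 0
--     N = len(a)
--     cnt = dict()
--     for i in a:                                                         # 수열의 각 원소의 개수를 찾아줌
--         cnt[i] = cnt.get(i, 0) + 1
--     cnt = sorted(cnt.items(), key=lambda x: -x[1])                      # 원소의 개수가 많은 순서대로 정렬
--
--     for n, c in cnt:
--         max_l = min(c, N - c) * 2                                       # 스타 수열의 최대 길이는 현재 원소 개수 또는 나머지 원소 개수 중 적은것을 2배한 값과 같음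
--         if max_l < answer: break                                        # 최대 길이가 이미 구한 answer 보다 작아진다면 반복 종료
--
--         l = 0
--         visited = [0] * N
--         for i in range(N):
--             if a[i] != n: continue                                      # 현재 확인할 원소 n의 위치를 찾아줌
--
--             if i > 0 and a[i - 1] != a[i] and not visited[i - 1]:       # n 이전의 원소가 n이 아니고 사용하지 않은 원소이면
--                 visited[i - 1] = visited[i] = 1                         # 두 개를 스타수열 원소로 사용하고 스타수열 길이를 2 늘려줌
--                 l += 2
--             elif i < N - 1 and a[i] != a[i + 1]:                        # 이전 원소가 조건이 안맞다면 다음 원소를 확인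
--                 visited[i] = visited[i + 1] = 1
--                 l += 2
--
--         if answer < l: answer = l                                       # 현재 구한 스타수열 길이가 저장된 answer보다 크면 갱신하고
--         if l == max_l: break                                            # 그 길이가 최대값일 경우 반복종료
--
--     return answer
-- ===== SOURCE B (Python) =====
-- def solution(a):
--     # One left-to-right pass: for every value v maintain its greedy star-length and
--     # the index it last consumed as a right neighbour; track the running maximum.
--     N = len(a)
--     length = {}
--     blocked = {}
--     ans = 0
--     for i, v in enumerate(a):
--         if i > 0 and a[i - 1] != v and blocked.get(v) != i - 1:
--             length[v] = length.get(v, 0) + 2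
--         elif i < N - 1 and a[i + 1] != v:
--             blocked[v] = i + 1
--             length[v] = length.get(v, 0) + 2
--         else:
--             continue
--         if length[v] > ans:
--             ans = length[v]
--     return ans
-- ===== Notes on version B (the rewrite author's own statement) =====
-- stated objective: alternative
-- what changed: A counts values, sorts them by frequency and rescans the whole array with a fresh visited array per candidate value (with pruning breaks); B makes one left-to-right pass that advances every value's greedy pairing simultaneously in two dicts (length so far, last index consumed as right neighbour) and tracks the running maximum, with no counting, sorting, pruning or visited array.
import Mathlib
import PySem

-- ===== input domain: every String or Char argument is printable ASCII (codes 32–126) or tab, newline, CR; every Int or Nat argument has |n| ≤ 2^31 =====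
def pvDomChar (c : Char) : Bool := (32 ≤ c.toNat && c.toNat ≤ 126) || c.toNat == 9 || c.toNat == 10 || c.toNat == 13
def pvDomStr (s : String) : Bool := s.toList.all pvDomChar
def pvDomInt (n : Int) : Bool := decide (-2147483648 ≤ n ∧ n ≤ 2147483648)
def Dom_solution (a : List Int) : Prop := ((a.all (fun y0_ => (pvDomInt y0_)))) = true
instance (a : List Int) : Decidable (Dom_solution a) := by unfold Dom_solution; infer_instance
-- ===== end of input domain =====

-- B replaces A's count-sort-and-prune outer loop (rescanning the whole array with a fresh
-- visited array per candidate value) by a single left-to-right pass that advances every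
-- value's greedy pairing simultaneously (two dicts) while tracking the running maximum.

-- ===== PORT A =====
-- A's inner loop: 'for i in range(N): …' over the whole array; visited is a 0/1 list
def pvInnerA (a : List Int) (n : Int) : List Int → List Int → Int → Int
  | [], _, l => l
  | i :: rest, visited, l =>
    if PySem.List.pyGetD a i 0 ≠ n then pvInnerA a n rest visited l
    else if 0 < i ∧ PySem.List.pyGetD a (i - 1) 0 ≠ PySem.List.pyGetD a i 0 ∧
        PySem.List.pyGetD visited (i - 1) 0 = 0 then
      pvInnerA a n rest (PySem.List.pySetD (PySem.List.pySetD visited (i - 1) 1) i 1) (l + 2)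
    else if i < (a.length : Int) - 1 ∧ PySem.List.pyGetD a i 0 ≠ PySem.List.pyGetD a (i + 1) 0 then
      pvInnerA a n rest (PySem.List.pySetD (PySem.List.pySetD visited i 1) (i + 1) 1) (l + 2)
    else pvInnerA a n rest visited l

-- A's outer loop over sorted (value, count) items, with its two 'break's
def pvOuterA (a : List Int) : List (Int × Int) → Int → Int
  | [], ans => ans
  | (n, c) :: rest, ans =>
    let maxl := min c ((a.length : Int) - c) * 2
    if maxl < ans then ans
    else
      let l := pvInnerA a n (PySem.List.pyRange 0 (a.length : Int) 1) (List.replicate a.length 0) 0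
      let ans' := if ans < l then l else ans
      if l = maxl then ans' else pvOuterA a rest ans'

def solution (a : List Int) : Int :=
  let cnt := a.foldl (fun d i => d.insert i (d.getD i 0 + 1)) PySem.Dict.empty
  pvOuterA a (PySem.List.sorted cnt.items (fun x => -x.2)) 0

-- ===== PORT B =====
-- B's single pass: for each (i, v) of enumerate(a) advance v's greedy state
-- (length dict + last right-consumed neighbour dict) and the running maximum.
def pvLoopB (a : List Int) : List (Int × Int) → PySem.Dict Int Int → PySem.Dict Int Int → Int → Int
  | [], _, _, ans => ans
  | (i, v) :: rest, lend, blkd, ans =>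
    if 0 < i ∧ PySem.List.pyGetD a (i - 1) 0 ≠ v ∧ blkd.get? v ≠ some (i - 1) then
      let nl := lend.getD v 0 + 2
      pvLoopB a rest (lend.insert v nl) blkd (if nl > ans then nl else ans)
    else if i < (a.length : Int) - 1 ∧ PySem.List.pyGetD a (i + 1) 0 ≠ v then
      let nl := lend.getD v 0 + 2
      pvLoopB a rest (lend.insert v nl) (blkd.insert v (i + 1)) (if nl > ans then nl else ans)
    else pvLoopB a rest lend blkd ans

def solution_alt (a : List Int) : Int :=
  pvLoopB a (PySem.List.enumerate a) PySem.Dict.empty PySem.Dict.empty 0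

-- ===== PRECONDITION & SPEC =====
def Spec_solution (a : List Int) (out : Int) : Prop := out = solution_alt a
instance (a : List Int) (out : Int) : Decidable (Spec_solution a out) := by unfold Spec_solution; infer_instance

-- ===== CLAIM (what is proved, stated in full; the proofs are below) =====
def Claim_equal_solution : Prop := ∀ (a : List Int), Dom_solution a → Spec_solution a (solution a)

-- ===== LEMMAS AND PROOFS =====

-- the greedy pairing step for one occurrence i of value v; state = (blocked neighbour, length)
def pvStep (a : List Int) (v : Int) (st : Option Int × Int) (i : Int) : Option Int × Int :=
  if 0 < i ∧ PySem.List.pyGetD a (i - 1) 0 ≠ v ∧ st.1 ≠ some (i - 1) then (st.1, st.2 + 2)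
  else if i < (a.length : Int) - 1 ∧ PySem.List.pyGetD a (i + 1) 0 ≠ v then (some (i + 1), st.2 + 2)
  else st

def pvRun (a : List Int) (v : Int) (ps : List Int) (st : Option Int × Int) : Option Int × Int :=
  ps.foldl (pvStep a v) st

-- the positions of v in a, as Int indices
def pvPos (a : List Int) (v : Int) : List Int :=
  ((PySem.List.enumerate a).filter (fun p => p.2 == v)).map (·.1)

-- the greedy star-length of value v
def pvL (a : List Int) (v : Int) : Int := (pvRun a v (pvPos a v) (none, 0)).2

theorem pvStep_snd_le (a : List Int) (v : Int) (st : Option Int × Int) (i : Int) :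
    st.2 ≤ (pvStep a v st i).2 := by
  unfold pvStep; split_ifs <;> simp

theorem pvStep_snd_le_two (a : List Int) (v : Int) (st : Option Int × Int) (i : Int) :
    (pvStep a v st i).2 ≤ st.2 + 2 := by
  unfold pvStep; split_ifs <;> simp

theorem pvRun_mono (a : List Int) (v : Int) :
    ∀ (ps : List Int) (st : Option Int × Int), st.2 ≤ (pvRun a v ps st).2
  | [], _ => le_refl _
  | i :: rest, st =>
    le_trans (pvStep_snd_le a v st i) (pvRun_mono a v rest (pvStep a v st i))

theorem pvRun_le (a : List Int) (v : Int) :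
    ∀ (ps : List Int) (st : Option Int × Int),
      (pvRun a v ps st).2 ≤ st.2 + 2 * ps.length
  | [], _ => by simp [pvRun]
  | i :: rest, st => by
    have h1 := pvRun_le a v rest (pvStep a v st i)
    have h2 := pvStep_snd_le_two a v st i
    have : pvRun a v (i :: rest) st = pvRun a v rest (pvStep a v st i) := rfl
    rw [this]
    simp only [List.length_cons]
    push_cast
    omega

theorem pvPos_length (a : List Int) (v : Int) :
    (pvPos a v).length = List.count v a := by
  unfold pvPos
  rw [List.length_map, ← List.countP_eq_length_filter]
  conv_rhs => rw [← PySem.List.map_snd_enumerate a 0, List.count_eq_countP, List.countP_map]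
  rfl

theorem pvL_le (a : List Int) (v : Int) : pvL a v ≤ 2 * (List.count v a : Int) := by
  have := pvRun_le a v (pvPos a v) (none, 0)
  rw [pvPos_length] at this
  unfold pvL
  omega

-- two distinct values occupy disjoint positions
theorem pvTwoCount_nat (v w : Int) (h : v ≠ w) :
    ∀ a : List Int, List.count v a + List.count w a ≤ a.length := by
  intro a
  induction a with
  | nil => simp
  | cons x t ih =>
    simp only [List.count_cons, List.length_cons]
    by_cases hv : x = v <;> by_cases hw : x = w <;> simp_all <;> omega

theorem pvTwoCount (v w : Int) (h : v ≠ w) (a : List Int) :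
    (List.count v a : Int) + (List.count w a : Int) ≤ (a.length : Int) := by
  exact_mod_cast pvTwoCount_nat v w h a

-- fold-of-max algebra
theorem pvFoldlMax_init {α : Type} (f : α → Int) (l : List α) (x y : Int) :
    l.foldl (fun m k => max m (f k)) (max x y)
      = max (l.foldl (fun m k => max m (f k)) x) y := by
  induction l generalizing x with
  | nil => simp
  | cons k t ih => simp only [List.foldl_cons, max_right_comm x y (f k)]; exact ih _

theorem pvFoldlMax_absorb {α : Type} (f : α → Int) (l : List α) (x : Int)
    (h : ∀ k ∈ l, f k ≤ x) :
    l.foldl (fun m k => max m (f k)) x = x := by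
  induction l with
  | nil => rfl
  | cons k t ih =>
    simp only [List.foldl_cons, max_eq_left (h k (List.mem_cons_self))]
    exact ih (fun q hq => h q (List.mem_cons_of_mem _ hq))

theorem pvFoldlMax_perm {α : Type} (f : α → Int) {l₁ l₂ : List α} (h : l₁.Perm l₂) :
    ∀ init : Int, l₁.foldl (fun m k => max m (f k)) init
      = l₂.foldl (fun m k => max m (f k)) init := by
  induction h with
  | nil => intro init; rfl
  | cons x _ ih => intro init; simp only [List.foldl_cons]; exact ih _
  | swap x y l => intro init; simp only [List.foldl_cons, max_right_comm init (f y) (f x)]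
  | trans _ _ ih₁ ih₂ => intro init; rw [ih₁, ih₂]

-- indexing helper (from the previous development of these ports)
theorem pvGetD_pySetD_int (xs : List Int) (i j : Int) (v d : Int)
    (hi0 : 0 ≤ i) (hiN : i < (xs.length : Int)) (hj : 0 ≤ j) :
    PySem.List.pyGetD (PySem.List.pySetD xs i v) j d
      = if j = i then v else PySem.List.pyGetD xs j d := by
  obtain ⟨im, rfl⟩ := Int.eq_ofNat_of_zero_le hi0
  obtain ⟨jm, rfl⟩ := Int.eq_ofNat_of_zero_le hj
  rw [PySem.List.pyGetD_pySetD_natCast xs im jm v d (by exact_mod_cast hiN)]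
  simp [Nat.cast_inj]

-- STEP I: A's full-array scan with a visited array computes the greedy pvRun over the
-- positions of v; the invariant ties visited (for non-v indices yet to be read) to the
-- single blocked neighbour of the Option state.
theorem pvInner_run (a : List Int) (v : Int) :
    ∀ (rl : List Int) (visited : List Int) (blk : Option Int) (l : Int),
      (∀ i ∈ rl, 0 ≤ i ∧ i < (a.length : Int)) →
      rl.Pairwise (· < ·) →
      visited.length = a.length →
      (∀ m, blk = some m → ∀ i ∈ rl, m ≤ i) →
      (∀ j : Int, 0 ≤ j → j < (a.length : Int) → PySem.List.pyGetD a j 0 ≠ v →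
        (∃ i₀, rl.head? = some i₀ ∧ i₀ - 1 ≤ j) →
        (PySem.List.pyGetD visited j 0 = 0 ↔ blk ≠ some j)) →
      pvInnerA a v rl visited l
        = (pvRun a v (rl.filter (fun i => PySem.List.pyGetD a i 0 == v)) (blk, l)).2
  | [], _, _, _, _, _, _, _, _ => rfl
  | i :: rest, visited, blk, l, h1, hp, h2, hb, h3 => by
    obtain ⟨hi0, hiN⟩ := h1 i (List.mem_cons_self)
    have h1' : ∀ i' ∈ rest, 0 ≤ i' ∧ i' < (a.length : Int) := fun j hj => h1 j (by simp [hj])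
    have hlt : ∀ i' ∈ rest, i < i' := (List.pairwise_cons.1 hp).1
    have hp' : rest.Pairwise (· < ·) := (List.pairwise_cons.1 hp).2
    by_cases hv : PySem.List.pyGetD a i 0 = v
    · -- i is a position of v: both sides take one greedy step
      have hfc : List.filter (fun i => PySem.List.pyGetD a i 0 == v) (i :: rest)
          = i :: List.filter (fun i => PySem.List.pyGetD a i 0 == v) rest := by simp [hv]
      rw [hfc]
      have hrun : ∀ st : Option Int × Int,
          pvRun a v (i :: List.filter (fun i => PySem.List.pyGetD a i 0 == v) rest) st
          = pvRun a v (List.filter (fun i => PySem.List.pyGetD a i 0 == v) rest)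
              (pvStep a v st i) := fun _ => rfl
      rw [hrun, pvInnerA, if_neg (not_not_intro hv)]
      by_cases hc1 : 0 < i ∧ PySem.List.pyGetD a (i - 1) 0 ≠ v ∧ blk ≠ some (i - 1)
      · -- pair with the left neighbour on both sides
        obtain ⟨hip, hane, hbne⟩ := hc1
        have hb1 : (0:Int) ≤ i - 1 := by omega
        have hb2 : i - 1 < (a.length : Int) := by omega
        have hv0 : PySem.List.pyGetD visited (i - 1) 0 = 0 :=
          (h3 (i - 1) hb1 hb2 hane ⟨i, rfl, by omega⟩).2 hbne
        rw [if_pos ⟨hip, by rw [hv]; exact hane, hv0⟩]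
        have hstep : pvStep a v (blk, l) i = (blk, l + 2) := by
          unfold pvStep; rw [if_pos ⟨hip, hane, hbne⟩]
        rw [hstep]
        apply pvInner_run a v rest _ _ _ h1' hp'
        · simp [PySem.List.length_pySetD, h2]
        · exact fun m hm i' hi' => hb m hm i' (by simp [hi'])
        · intro j hj0 hjN haj hhead
          obtain ⟨i₂, hi₂, hji₂⟩ := hhead
          have hi₂r : i₂ ∈ rest := List.mem_of_mem_head? hi₂
          have hji : i ≤ j := by have := hlt i₂ hi₂r; omega
          have hjne : j ≠ i := fun h => haj (h ▸ hv)
          rw [pvGetD_pySetD_int _ i j _ _ hi0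
              (by rw [PySem.List.length_pySetD, h2]; exact_mod_cast hiN) hj0,
            if_neg (by omega),
            pvGetD_pySetD_int _ (i - 1) j _ _ hb1 (by rw [h2]; exact_mod_cast hb2) hj0,
            if_neg (by omega)]
          exact h3 j hj0 hjN haj ⟨i, rfl, by omega⟩
      · -- left pairing refused on both sides
        have hc1A : ¬ (0 < i ∧ PySem.List.pyGetD a (i - 1) 0 ≠ PySem.List.pyGetD a i 0 ∧
            PySem.List.pyGetD visited (i - 1) 0 = 0) := by
          rw [hv]
          intro ⟨hip, hane, hv0⟩
          exact hc1 ⟨hip, hane, (h3 (i - 1) (by omega) (by omega) hane ⟨i, rfl, by omega⟩).1 hv0⟩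
        rw [if_neg hc1A]
        by_cases hc2 : i < (a.length : Int) - 1 ∧ PySem.List.pyGetD a (i + 1) 0 ≠ v
        · -- pair with the right neighbour on both sides
          obtain ⟨hilt, hane⟩ := hc2
          rw [if_pos ⟨hilt, by rw [hv]; exact fun h => hane h.symm⟩]
          have hstep : pvStep a v (blk, l) i = (some (i + 1), l + 2) := by
            unfold pvStep; rw [if_neg (by exact fun h => hc1 h), if_pos ⟨hilt, hane⟩]
          rw [hstep]
          apply pvInner_run a v rest _ _ _ h1' hp'
          · simp [PySem.List.length_pySetD, h2]
          · intro m hm i' hi'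
            have := hlt i' hi'
            simp only [Option.some.injEq] at hm
            omega
          · intro j hj0 hjN haj hhead
            obtain ⟨i₂, hi₂, hji₂⟩ := hhead
            have hi₂r : i₂ ∈ rest := List.mem_of_mem_head? hi₂
            have hji : i ≤ j := by have := hlt i₂ hi₂r; omega
            have hjne : j ≠ i := fun h => haj (h ▸ hv)
            have hb2 : i + 1 < (a.length : Int) := by omega
            rw [pvGetD_pySetD_int _ (i + 1) j _ _ (by omega)
                (by rw [PySem.List.length_pySetD, h2]; exact_mod_cast hb2) hj0]
            by_cases hji1 : j = i + 1
            · subst hji1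
              simp
            · rw [if_neg hji1,
                pvGetD_pySetD_int _ i j _ _ hi0 (by rw [h2]; exact_mod_cast hiN) hj0,
                if_neg (by omega)]
              have hold := h3 j hj0 hjN haj ⟨i, rfl, by omega⟩
              constructor
              · intro _ hc
                simp only [Option.some.injEq] at hc
                omega
              · intro _
                refine hold.2 ?_
                intro hbj
                have := hb j hbj i (List.mem_cons_self)
                omega
        · have hc2A : ¬ (i < (a.length : Int) - 1 ∧
              PySem.List.pyGetD a i 0 ≠ PySem.List.pyGetD a (i + 1) 0) := by
            rw [hv]; intro ⟨u, w⟩; exact hc2 ⟨u, fun h => w h.symm⟩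
          rw [if_neg hc2A]
          have hstep : pvStep a v (blk, l) i = (blk, l) := by
            unfold pvStep; rw [if_neg (by exact fun h => hc1 h), if_neg (by exact fun h => hc2 h)]
          rw [hstep]
          apply pvInner_run a v rest _ _ _ h1' hp' h2
          · exact fun m hm i' hi' => hb m hm i' (by simp [hi'])
          · intro j hj0 hjN haj hhead
            obtain ⟨i₂, hi₂, hji₂⟩ := hhead
            have hi₂r : i₂ ∈ rest := List.mem_of_mem_head? hi₂
            exact h3 j hj0 hjN haj ⟨i, rfl, by have := hlt i₂ hi₂r; omega⟩
    · -- not a position of v: A skips it, the filter drops it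
      have hfc : List.filter (fun i => PySem.List.pyGetD a i 0 == v) (i :: rest)
          = List.filter (fun i => PySem.List.pyGetD a i 0 == v) rest := by simp [hv]
      rw [hfc, pvInnerA, if_pos hv]
      apply pvInner_run a v rest _ _ _ h1' hp' h2
      · exact fun m hm i' hi' => hb m hm i' (by simp [hi'])
      · intro j hj0 hjN haj hhead
        obtain ⟨i₂, hi₂, hji₂⟩ := hhead
        have hi₂r : i₂ ∈ rest := List.mem_of_mem_head? hi₂
        exact h3 j hj0 hjN haj ⟨i, rfl, by have := hlt i₂ hi₂r; omega⟩

theorem pvPos_eq_filter_range (a : List Int) (v : Int) :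
    pvPos a v
      = (PySem.List.pyRange 0 (a.length : Int) 1).filter
          (fun i => PySem.List.pyGetD a i 0 == v) := by
  unfold pvPos
  rw [PySem.List.enumerate_eq_map_pyRange a 0, List.filter_map, List.map_map]
  simp only [Function.comp_def]
  simp [PySem.List.len]

theorem pvRange_pairwise_lt (a : List Int) :
    (PySem.List.pyRange 0 (a.length : Int) 1).Pairwise (· < ·) := by
  have h := PySem.List.pairwise_lt_enumerate a 0
  have hm := PySem.List.map_fst_enumerate a 0
  rw [zero_add] at hm
  rw [← hm]
  exact List.pairwise_map.2 h

theorem pvInnerA_eq_pvL (a : List Int) (v : Int) :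
    pvInnerA a v (PySem.List.pyRange 0 (a.length : Int) 1) (List.replicate a.length 0) 0
      = pvL a v := by
  rw [pvInner_run a v _ _ none 0
    (fun i hi => by have := PySem.List.mem_pyRange_one.1 hi; omega)
    (pvRange_pairwise_lt a)
    (by simp)
    (fun m hm => by simp at hm)
    (fun j hj0 hjN _ _ => by
      obtain ⟨jm, rfl⟩ := Int.eq_ofNat_of_zero_le hj0
      rw [PySem.List.pyGetD_natCast]
      simp [List.getD])]
  rw [← pvPos_eq_filter_range]
  rfl

-- STEP II: A's pruned most-frequent-first outer loop computes the plain running maximum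
-- of the greedy lengths (the breaks are safe: pvL v ≤ 2·count v and two distinct counts
-- sum to at most N).
theorem pvOuterA_eq (a : List Int) :
    ∀ (items : List (Int × Int)) (ans : Int),
      (∀ p ∈ items, p.2 = (List.count p.1 a : Int)) →
      items.Pairwise (fun p q => p.1 ≠ q.1) →
      items.Pairwise (fun p q => q.2 ≤ p.2) →
      0 ≤ ans →
      (∀ p ∈ items, ans ≤ 2 * ((a.length : Int) - p.2)) →
      pvOuterA a items ans = items.foldl (fun m p => max m (pvL a p.1)) ans
  | [], ans, _, _, _, _, _ => rfl
  | (n, c) :: rest, ans, hc, hnd, hdesc, hge, hbound => by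
    have hcc : c = (List.count n a : Int) := hc (n, c) (List.mem_cons_self)
    have hcle : (List.count n a : Int) ≤ (a.length : Int) := by
      exact_mod_cast List.count_le_length
    have hfst : ∀ p ∈ rest, n ≠ p.1 := fun p hp => (List.pairwise_cons.1 hnd).1 p hp
    have hcd : ∀ p ∈ rest, p.2 ≤ c := fun p hp => (List.pairwise_cons.1 hdesc).1 p hp
    have hcrest : ∀ p ∈ rest, p.2 = (List.count p.1 a : Int) :=
      fun p hp => hc p (List.mem_cons_of_mem _ hp)
    have hrest_sum : ∀ p ∈ rest, c + p.2 ≤ (a.length : Int) := by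
      intro p hp
      rw [hcc, hcrest p hp]
      exact pvTwoCount n p.1 (hfst p hp) a
    have hLn : pvL a n ≤ 2 * c := by rw [hcc]; exact pvL_le a n
    have hLrest : ∀ p ∈ rest, pvL a p.1 ≤ 2 * p.2 := by
      intro p hp
      rw [hcrest p hp]
      exact pvL_le a p.1
    rw [pvOuterA]
    simp only [pvInnerA_eq_pvL a n]
    by_cases hbr : min c ((a.length : Int) - c) * 2 < ans
    · rw [if_pos hbr]
      have hcsmall : c ≤ (a.length : Int) - c := by
        by_contra h
        have : min c ((a.length : Int) - c) = (a.length : Int) - c := by omega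
        have := hbound (n, c) (List.mem_cons_self)
        simp only at this
        omega
      have hmin : min c ((a.length : Int) - c) = c := by omega
      rw [hmin] at hbr
      rw [pvFoldlMax_absorb]
      intro p hp
      rcases List.mem_cons.1 hp with h | h
      · rw [h]; simp only; omega
      · have := hLrest p h
        have := hcd p h
        omega
    · rw [if_neg hbr]
      have hans' : (if ans < pvL a n then pvL a n else ans) = max ans (pvL a n) := by
        rw [max_def]; split_ifs <;> omega
      rw [List.foldl_cons, hans']
      by_cases hstop : pvL a n = min c ((a.length : Int) - c) * 2
      · rw [if_pos hstop]
        rw [pvFoldlMax_absorb]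
        intro p hp
        have h1 := hLrest p hp
        have h2 := hcd p hp
        have h3 := hrest_sum p hp
        have hfstn : pvL a (n, c).1 = pvL a n := rfl
        have : pvL a p.1 ≤ min c ((a.length : Int) - c) * 2 := by omega
        omega
      · rw [if_neg hstop]
        apply pvOuterA_eq a rest (max ans (pvL a n)) hcrest
          (List.pairwise_cons.1 hnd).2 (List.pairwise_cons.1 hdesc).2
          (le_trans hge (le_max_left _ _))
        intro p hp
        have h1 := hbound p (List.mem_cons_of_mem _ hp)
        have h2 := hrest_sum p hp
        omega

theorem solution_eq_sup (a : List Int) :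
    solution a = (PySem.Set.ofList a).foldl (fun m k => max m (pvL a k)) 0 := by
  show pvOuterA a (PySem.List.sorted
      (a.foldl (fun d i => d.insert i (d.getD i 0 + 1)) PySem.Dict.empty).items
      (fun x => -x.2)) 0 = _
  rw [PySem.Dict.foldl_insert_getD_add_one_eq_counter, PySem.Dict.items_counter]
  set items := (PySem.Set.ofList a).map (fun k => (k, (List.count k a : Int))) with hitems
  have hmem : ∀ p ∈ PySem.List.sorted items (fun x => -x.2) false,
      p.2 = (List.count p.1 a : Int) ∧ p.1 ∈ PySem.Set.ofList a := by
    intro p hp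
    have := (PySem.List.mem_sorted _ _ _ _).1 hp
    obtain ⟨k, hk, rfl⟩ := List.mem_map.1 this
    exact ⟨rfl, hk⟩
  rw [pvOuterA_eq a _ 0 (fun p hp => (hmem p hp).1)]
  · rw [pvFoldlMax_perm (fun p => pvL a p.1) (PySem.List.sorted_perm items (fun x => -x.2) false) 0]
    rw [hitems, List.foldl_map]
  · -- distinct first components: a permutation of a list with nodup firsts
    have hnd : (PySem.List.sorted items (fun x => -x.2) false).map (fun p => p.1)
        |>.Nodup := by
      have hperm : ((PySem.List.sorted items (fun x => -x.2) false).map (fun p => p.1)).Perm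
          (items.map (fun p => p.1)) :=
        (PySem.List.sorted_perm items (fun x => -x.2) false).map _
      refine hperm.nodup_iff.2 ?_
      rw [hitems, List.map_map]
      simp [Function.comp_def, PySem.Set.nodup_ofList a]
    rw [List.Nodup, List.pairwise_map] at hnd
    exact hnd
  · have := PySem.List.sorted_pairwise items (fun x => -x.2)
    exact this.imp (fun h => by omega)
  · exact le_refl 0
  · intro p hp
    have h1 := (hmem p hp).1
    have h2 : (List.count p.1 a : Int) ≤ (a.length : Int) := by
      exact_mod_cast List.count_le_length
    omega

-- STEP III: B's fused pass projects, per value, to the same greedy pvRun; the running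
-- maximum collects one term per distinct value.
theorem pvFoldlAdd_cons (x : Int) :
    ∀ (l : List Int) (s : List Int), x ∉ l →
      List.foldl PySem.Set.add (x :: s) l = x :: List.foldl PySem.Set.add s l
  | [], _, _ => rfl
  | y :: t, s, h => by
    have hxy : (y == x) = false := by
      simp only [beq_eq_false_iff_ne]
      exact fun he => h (by simp [he])
    have hadd : PySem.Set.add (x :: s) y = x :: PySem.Set.add s y := by
      simp only [PySem.Set.add, PySem.Set.contains, List.contains_cons, hxy,
        Bool.false_or, List.cons_append]
      split <;> rfl
    rw [List.foldl_cons, List.foldl_cons, hadd]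
    exact pvFoldlAdd_cons x t _ (fun hm => h (by simp [hm]))

theorem pvOfList_cons_not_mem (x : Int) (l : List Int) (h : x ∉ l) :
    PySem.Set.ofList (x :: l) = x :: PySem.Set.ofList l := by
  rw [PySem.Set.ofList_eq_foldl, PySem.Set.ofList_eq_foldl, List.foldl_cons]
  exact pvFoldlAdd_cons x l _ h

theorem pvOfList_cons_mem (x : Int) (l : List Int) (h : x ∈ l) :
    (PySem.Set.ofList (x :: l)).Perm (PySem.Set.ofList l) := by
  rw [List.perm_ext_iff_of_nodup (PySem.Set.nodup_ofList _) (PySem.Set.nodup_ofList _)]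
  intro y
  rw [PySem.Set.mem_ofList, PySem.Set.mem_ofList, List.mem_cons]
  constructor
  · rintro (rfl | hy)
    · exact h
    · exact hy
  · exact Or.inr

-- one step of collecting the per-value maxima
theorem pvSupStep (l : List Int) (v : Int) (f : Int → Int) (ans c : Int)
    (hc : c ≤ f v) (hnotmem : v ∉ l → f v = c) :
    (PySem.Set.ofList (v :: l)).foldl (fun m k => max m (f k)) ans
      = (PySem.Set.ofList l).foldl (fun m k => max m (f k)) (max ans c) := by
  by_cases h : v ∈ l
  · rw [pvFoldlMax_perm f (pvOfList_cons_mem v l h)]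
    rw [pvFoldlMax_init]
    have hv := (PySem.List.le_foldl_max_int (PySem.Set.ofList l) f ans).2 v
      ((PySem.Set.mem_ofList l v).2 h)
    have := le_trans hc hv
    omega
  · rw [pvOfList_cons_not_mem v l h, List.foldl_cons, hnotmem h]

theorem pvFilter_nil_of_not_mem (v : Int) (l : List (Int × Int))
    (h : v ∉ l.map (fun p => p.2)) :
    l.filter (fun p => p.2 == v) = [] := by
  rw [List.filter_eq_nil_iff]
  intro p hp hpv
  exact h (List.mem_map.2 ⟨p, hp, by simpa using hpv⟩)
-- the per-value projection of the pass state: v's greedy value continued over ps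
def pvF (a : List Int) (lend blkd : PySem.Dict Int Int) (ps : List (Int × Int)) (k : Int) : Int :=
  (pvRun a k ((ps.filter (fun p => p.2 == k)).map (fun p => p.1))
    (blkd.get? k, lend.getD k 0)).2

theorem pvF_step (a : List Int) (i v : Int) (rest : List (Int × Int))
    (lend blkd lend' blkd' : PySem.Dict Int Int)
    (hstate : pvStep a v (blkd.get? v, lend.getD v 0) i = (blkd'.get? v, lend'.getD v 0))
    (hother : ∀ k, k ≠ v → blkd'.get? k = blkd.get? k ∧ lend'.getD k 0 = lend.getD k 0) :
    ∀ k, pvF a lend blkd ((i, v) :: rest) k = pvF a lend' blkd' rest k := by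
  intro k
  unfold pvF
  by_cases hk : k = v
  · subst hk
    have hf : ((i, k) :: rest).filter (fun p => p.2 == k)
        = (i, k) :: rest.filter (fun p => p.2 == k) := by simp
    rw [hf, List.map_cons]
    show (pvRun a k (rest.filter (fun p => p.2 == k) |>.map (fun p => p.1))
      (pvStep a k (blkd.get? k, lend.getD k 0) i)).2 = _
    rw [hstate]
  · have hvk : ((v : Int) == k) = false := by
      simp only [beq_eq_false_iff_ne]
      exact fun h => hk h.symm
    have hf : ((i, v) :: rest).filter (fun p => p.2 == k)
        = rest.filter (fun p => p.2 == k) := by simp [hvk]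
    rw [hf, (hother k hk).1, (hother k hk).2]

theorem pvLoopB_eq (a : List Int) :
    ∀ (ps : List (Int × Int)) (lend blkd : PySem.Dict Int Int) (ans : Int),
      0 ≤ ans →
      (∀ k, lend.getD k 0 ≤ ans) →
      pvLoopB a ps lend blkd ans
        = (PySem.Set.ofList (ps.map (fun p => p.2))).foldl
            (fun m k => max m (pvF a lend blkd ps k)) ans
  | [], _, _, _, _, _ => rfl
  | (i, v) :: rest, lend, blkd, ans, hge, hle => by
    have hmap : ((i, v) :: rest).map (fun p => p.2) = v :: rest.map (fun p => p.2) := rfl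
    rw [hmap, pvLoopB]
    by_cases hc1 : 0 < i ∧ PySem.List.pyGetD a (i - 1) 0 ≠ v ∧ blkd.get? v ≠ some (i - 1)
    · rw [if_pos hc1]
      have hstate : pvStep a v (blkd.get? v, lend.getD v 0) i
          = ((blkd.get? v : Option Int), (lend.insert v (lend.getD v 0 + 2)).getD v 0) := by
        rw [PySem.Dict.getD_insert, if_pos rfl]
        unfold pvStep
        split_ifs <;> rfl
      have hother : ∀ k, k ≠ v →
          blkd.get? k = blkd.get? k ∧ (lend.insert v (lend.getD v 0 + 2)).getD k 0 = lend.getD k 0 :=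
        fun k hk => ⟨rfl, by rw [PySem.Dict.getD_insert, if_neg hk]⟩
      have hcong := pvF_step a i v rest lend blkd (lend.insert v (lend.getD v 0 + 2)) blkd
        hstate hother
      have hrw : (fun (m : Int) (k : Int) => max m (pvF a lend blkd ((i, v) :: rest) k))
          = fun m k => max m (pvF a (lend.insert v (lend.getD v 0 + 2)) blkd rest k) := by
        funext m k; rw [hcong k]
      rw [hrw]
      rw [pvSupStep (rest.map (fun p => p.2)) v
        (pvF a (lend.insert v (lend.getD v 0 + 2)) blkd rest) ans (lend.getD v 0 + 2)
        (by
          unfold pvF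
          rw [PySem.Dict.getD_insert, if_pos rfl]
          exact pvRun_mono a v _ _)
        (by
          intro hnm
          unfold pvF
          rw [pvFilter_nil_of_not_mem v rest hnm, PySem.Dict.getD_insert, if_pos rfl]
          rfl)]
      have hif : (if lend.getD v 0 + 2 > ans then lend.getD v 0 + 2 else ans)
          = max ans (lend.getD v 0 + 2) := by rw [max_def]; split_ifs <;> omega
      show pvLoopB a rest _ _ _ = _
      rw [hif]
      exact pvLoopB_eq a rest _ _ _
        (le_trans hge (le_max_left _ _))
        (fun k => by
          rw [PySem.Dict.getD_insert]
          split_ifs with h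
          · exact le_max_right _ _
          · exact le_trans (hle k) (le_max_left _ _))
    · rw [if_neg hc1]
      by_cases hc2 : i < (a.length : Int) - 1 ∧ PySem.List.pyGetD a (i + 1) 0 ≠ v
      · rw [if_pos hc2]
        have hstate : pvStep a v (blkd.get? v, lend.getD v 0) i
            = ((blkd.insert v (i + 1)).get? v, (lend.insert v (lend.getD v 0 + 2)).getD v 0) := by
          rw [PySem.Dict.getD_insert, if_pos rfl, PySem.Dict.get?_insert_self]
          unfold pvStep
          split_ifs with h1 <;> first | rfl | exact absurd h1 hc1
        have hother : ∀ k, k ≠ v →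
            (blkd.insert v (i + 1)).get? k = blkd.get? k ∧
            (lend.insert v (lend.getD v 0 + 2)).getD k 0 = lend.getD k 0 :=
          fun k hk => ⟨PySem.Dict.get?_insert_of_ne blkd (i + 1) hk,
            by rw [PySem.Dict.getD_insert, if_neg hk]⟩
        have hcong := pvF_step a i v rest lend blkd
          (lend.insert v (lend.getD v 0 + 2)) (blkd.insert v (i + 1)) hstate hother
        have hrw : (fun (m : Int) (k : Int) => max m (pvF a lend blkd ((i, v) :: rest) k))
            = fun m k => max m
              (pvF a (lend.insert v (lend.getD v 0 + 2)) (blkd.insert v (i + 1)) rest k) := by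
          funext m k; rw [hcong k]
        rw [hrw]
        rw [pvSupStep (rest.map (fun p => p.2)) v
          (pvF a (lend.insert v (lend.getD v 0 + 2)) (blkd.insert v (i + 1)) rest) ans
          (lend.getD v 0 + 2)
          (by
            unfold pvF
            rw [PySem.Dict.getD_insert, if_pos rfl]
            exact pvRun_mono a v _ _)
          (by
            intro hnm
            unfold pvF
            rw [pvFilter_nil_of_not_mem v rest hnm, PySem.Dict.getD_insert, if_pos rfl]
            rfl)]
        have hif : (if lend.getD v 0 + 2 > ans then lend.getD v 0 + 2 else ans)
            = max ans (lend.getD v 0 + 2) := by rw [max_def]; split_ifs <;> omega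
        show pvLoopB a rest _ _ _ = _
        rw [hif]
        exact pvLoopB_eq a rest _ _ _
          (le_trans hge (le_max_left _ _))
          (fun k => by
            rw [PySem.Dict.getD_insert]
            split_ifs with h
            · exact le_max_right _ _
            · exact le_trans (hle k) (le_max_left _ _))
      · rw [if_neg hc2]
        have hstate : pvStep a v (blkd.get? v, lend.getD v 0) i
            = ((blkd.get? v : Option Int), lend.getD v 0) := by
          unfold pvStep
          split_ifs with h1 <;> first | rfl | exact absurd h1 hc1
        have hcong := pvF_step a i v rest lend blkd lend blkd hstate
          (fun k _ => ⟨rfl, rfl⟩)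
        have hrw : (fun (m : Int) (k : Int) => max m (pvF a lend blkd ((i, v) :: rest) k))
            = fun m k => max m (pvF a lend blkd rest k) := by
          funext m k; rw [hcong k]
        rw [hrw]
        rw [pvSupStep (rest.map (fun p => p.2)) v (pvF a lend blkd rest) ans (lend.getD v 0)
          (by unfold pvF; exact pvRun_mono a v _ _)
          (by
            intro hnm
            unfold pvF
            rw [pvFilter_nil_of_not_mem v rest hnm]
            rfl)]
        rw [max_eq_left (hle v)]
        exact pvLoopB_eq a rest _ _ _ hge hle

theorem solution_alt_eq_sup (a : List Int) :
    solution_alt a = (PySem.Set.ofList a).foldl (fun m k => max m (pvL a k)) 0 := by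
  show pvLoopB a (PySem.List.enumerate a) PySem.Dict.empty PySem.Dict.empty 0 = _
  rw [pvLoopB_eq a (PySem.List.enumerate a) PySem.Dict.empty PySem.Dict.empty 0 (le_refl 0)
    (fun k => by rw [PySem.Dict.getD_empty])]
  have hmap : (PySem.List.enumerate a).map (fun p => p.2) = a :=
    PySem.List.map_snd_enumerate a 0
  rw [hmap]
  have hF : ∀ k, pvF a PySem.Dict.empty PySem.Dict.empty (PySem.List.enumerate a) k
      = pvL a k := by
    intro k
    unfold pvF pvL pvPos
    rw [PySem.Dict.get?_empty, PySem.Dict.getD_empty]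
  have hrw : (fun (m : Int) (k : Int) =>
        max m (pvF a PySem.Dict.empty PySem.Dict.empty (PySem.List.enumerate a) k))
      = fun m k => max m (pvL a k) := by
    funext m k; rw [hF k]
  rw [hrw]

-- ===== VERDICT (by name: the statement is the Claim_ definition above) =====
theorem solution_spec : Claim_equal_solution := by
  intro a _
  show solution a = solution_alt a
  rw [solution_eq_sup, solution_alt_eq_sup]
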